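-- pv_equiv track=rewrite | github.com/EBI-Metagenomics/mett-dataportal | dataportal_api/pyhmmer_search/results/services/fasta_service.py | fix_fasta_content
-- ===== SOURCE A (Python) =====
-- def fix_fasta_content(content: str) -> str:
--     """Fix common FASTA content format issues."""
--     lines = content.strip().split("\n")
--     fixed_lines = []
--
--     for i, line in enumerate(lines):
--         if i % 2 == 0:  # Header line
--             if not line.startswith(">"):
--                 fixed_lines.append(f">{line}")
--             else:
--                 fixed_lines.append(line)
--         else:  # Sequence line
--             # Remove any non-sequence characters
--             cleaned_seq = "".join(c for c in line if c.isalpha() or c in "-*")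
--             if cleaned_seq:
--                 fixed_lines.append(cleaned_seq)
--
--     return "\n".join(fixed_lines) + "\n"
-- ===== SOURCE B (Python) =====
-- def fix_fasta_content(content: str) -> str:
--     """Fix common FASTA format issues (staged passes over strided slices)."""
--     lines = content.strip().split("\n")
--     headers = [h if h.startswith(">") else ">" + h for h in lines[0::2]]
--     seqs = ["".join(c for c in s if c.isalpha() or c in "-*") for s in lines[1::2]]
--     seqs += [""] * (len(headers) - len(seqs))
--     blocks = [h + ("\n" + s if s else "") for h, s in zip(headers, seqs)]
--     return "\n".join(blocks) + "\n"
-- ===== Notes on version B (the rewrite author's own statement) =====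
-- stated objective: alternative
-- what changed: Replaces A's single enumerate loop with an index-parity branch by staged passes: stride-slice the lines into a header list and a sequence list, fix each with its own comprehension, pad, zip them into per-record blocks and join the blocks.
import Mathlib
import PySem

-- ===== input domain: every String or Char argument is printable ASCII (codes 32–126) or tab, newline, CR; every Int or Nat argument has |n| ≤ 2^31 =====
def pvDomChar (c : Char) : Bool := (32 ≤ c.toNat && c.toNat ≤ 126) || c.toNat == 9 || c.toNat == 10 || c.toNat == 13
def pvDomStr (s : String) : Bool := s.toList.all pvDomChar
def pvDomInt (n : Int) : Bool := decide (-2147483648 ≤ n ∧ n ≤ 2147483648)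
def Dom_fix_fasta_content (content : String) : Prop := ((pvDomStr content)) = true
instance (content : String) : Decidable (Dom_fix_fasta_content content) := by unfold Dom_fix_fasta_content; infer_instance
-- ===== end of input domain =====

-- B replaces A's single enumerate-and-parity loop by staged passes: stride-slice the header and
-- sequence lines into two lists, fix each by a map, pad, zip into per-record blocks, join.
-- Objective: alternative decomposition (same cost).

-- ===== PORT A =====
-- the loop body of A, over (index, line) pairs from enumerate
def pvStepA (acc : List (List Char)) (p : Int × List Char) : List (List Char) :=
  if p.1 % 2 = 0 then
    if !(PySem.Chars.startswith p.2 ['>']) then acc ++ [['>'] ++ p.2] else acc ++ [p.2]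
  else
    -- 'c in "-*"': c is a single char, so membership in the two characters (exact)
    let cleaned := p.2.filter (fun c => PySem.Chars.isalpha c || (c == '-' || c == '*'))
    if cleaned ≠ [] then acc ++ [cleaned] else acc

def fix_fasta_content (content : String) : String :=
  let lines := PySem.Chars.splitOn (PySem.Chars.strip content.toList) ['\n']
  let fixed := (PySem.List.enumerate lines 0).foldl pvStepA []
  String.ofList (PySem.Chars.join ['\n'] fixed ++ ['\n'])

-- ===== PORT B =====
-- hand-written step-2 slices (PySem.List.slice has no step): pvStride0 = xs[0::2], pvStride1 = xs[1::2]
-- (exact: start 0 resp. 1, step 2, no stop, positive step on the whole list)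
def pvStride0 {α : Type} : List α → List α
  | [] => []
  | a :: t => a :: (match t with | [] => [] | _ :: t' => pvStride0 t')

def pvStride1 {α : Type} : List α → List α
  | [] => []
  | _ :: t => pvStride0 t

def pvFixH (h : List Char) : List Char :=
  if PySem.Chars.startswith h ['>'] then h else '>' :: h

def pvClean (s : List Char) : List Char :=
  s.filter (fun c => PySem.Chars.isalpha c || (c == '-' || c == '*'))

-- h + ("\n" + s if s else "")
def pvBlock (h s : List Char) : List Char :=
  h ++ (if s ≠ [] then '\n' :: s else [])

def fix_fasta_content_alt (content : String) : String :=
  let lines := PySem.Chars.splitOn (PySem.Chars.strip content.toList) ['\n']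
  let headers := (pvStride0 lines).map pvFixH
  let seqs := (pvStride1 lines).map pvClean
  let seqs := seqs ++ List.replicate (headers.length - seqs.length) []
  let blocks := List.zipWith pvBlock headers seqs
  String.ofList (PySem.Chars.join ['\n'] blocks ++ ['\n'])

-- ===== PRECONDITION & SPEC =====
def Spec_fix_fasta_content (content : String) (out : String) : Prop := out = fix_fasta_content_alt content
instance (content : String) (out : String) : Decidable (Spec_fix_fasta_content content out) := by unfold Spec_fix_fasta_content; infer_instance

-- ===== CLAIM (what is proved, stated in full; the proofs are below) =====
def Claim_equal_fix_fasta_content : Prop := ∀ (content : String), Dom_fix_fasta_content content → Spec_fix_fasta_content content (fix_fasta_content content)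

-- ===== LEMMAS AND PROOFS =====

-- the flat line list A's loop produces, as a pair recursion (proof-side reference object)
def pvRecA : List (List Char) → List (List Char)
  | [] => []
  | [h] => [pvFixH h]
  | h :: s :: t => pvFixH h :: (if pvClean s ≠ [] then [pvClean s] else []) ++ pvRecA t

-- A's fold over enumerate, started at any even index 2*k, flushes acc and appends pvRecA.
theorem pvLoopA_eq (lines : List (List Char)) :
    ∀ (acc : List (List Char)) (k : Nat),
      (PySem.List.enumerate lines (2 * (k : Int))).foldl pvStepA acc = acc ++ pvRecA lines := by
  induction lines using pvRecA.induct with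
  | case1 =>
    intro acc k; simp [PySem.List.enumerate_nil, pvRecA]
  | case2 h =>
    intro acc k
    have hk : (2 * (k : Int)) % 2 = 0 := by omega
    cases hst : PySem.Chars.startswith h ['>'] <;>
      simp [PySem.List.enumerate_cons, PySem.List.enumerate_nil, pvRecA, pvStepA, pvFixH, hk, hst]
  | case3 h s t ih =>
    intro acc k
    simp only [PySem.List.enumerate_cons, List.foldl_cons]
    have h2 : (2 * (k : Int)) + 1 + 1 = 2 * ((k + 1 : Nat) : Int) := by push_cast; ring
    rw [h2, ih _ (k + 1)]
    have hk : (2 * (k : Int)) % 2 = 0 := by omega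
    have hk1 : ¬ ((2 * (k : Int) + 1) % 2 = 0) := by omega
    simp only [pvStepA, pvRecA, pvClean, pvFixH, hk, hk1, if_true, if_false]
    cases hst : PySem.Chars.startswith h ['>'] <;> split <;> simp_all

-- B's staged passes produce exactly one block per record of the pair recursion.
def pvBlocks : List (List Char) → List (List Char)
  | [] => []
  | [h] => [pvBlock (pvFixH h) []]
  | h :: s :: t => pvBlock (pvFixH h) (pvClean s) :: pvBlocks t

theorem pvStride0_cons₂ {α : Type} (a b : α) (t : List α) :
    pvStride0 (a :: b :: t) = a :: pvStride0 t := rfl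

theorem pvStride1_cons₂ {α : Type} (a b : α) (t : List α) :
    pvStride1 (a :: b :: t) = b :: pvStride1 t := by cases t <;> rfl

theorem pvRecA_eq_nil (t : List (List Char)) : pvRecA t = [] ↔ t = [] := by
  induction t using pvRecA.induct <;> simp [pvRecA]

theorem pvBlocks_eq_nil (t : List (List Char)) : pvBlocks t = [] ↔ t = [] := by
  induction t using pvRecA.induct <;> simp [pvBlocks]

theorem pvJoin_cons_congr (sep x : List Char) {l₁ l₂ : List (List Char)}
    (h : PySem.Chars.join sep l₁ = PySem.Chars.join sep l₂) (hn : l₁ = [] ↔ l₂ = []) :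
    PySem.Chars.join sep (x :: l₁) = PySem.Chars.join sep (x :: l₂) := by
  cases l₁ with
  | nil => rw [hn.mp rfl]
  | cons a m =>
    cases l₂ with
    | nil => exact absurd (hn.mpr rfl) (by simp)
    | cons b m' => rw [PySem.Chars.join_cons_cons, PySem.Chars.join_cons_cons, h]

theorem pvZip_eq (lines : List (List Char)) :
    List.zipWith pvBlock ((pvStride0 lines).map pvFixH)
      ((pvStride1 lines).map pvClean ++
        List.replicate ((pvStride0 lines).length - (pvStride1 lines).length) [])
    = pvBlocks lines := by
  induction lines using pvRecA.induct with
  | case1 => simp [pvStride0, pvStride1, pvBlocks]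
  | case2 h => simp [pvStride0, pvStride1, pvBlocks]
  | case3 h s t ih =>
    simp only [pvStride0_cons₂, pvStride1_cons₂, pvBlocks, List.map_cons, List.length_cons,
      Nat.succ_sub_succ, List.zipWith_cons_cons, List.cons_append, ih]

-- joining the flat line list equals joining the per-record blocks (each block is header[+seq]).
theorem pvJoin_eq (lines : List (List Char)) :
    PySem.Chars.join ['\n'] (pvRecA lines) = PySem.Chars.join ['\n'] (pvBlocks lines) := by
  induction lines using pvRecA.induct with
  | case1 => rfl
  | case2 h => simp [pvRecA, pvBlocks, pvBlock]
  | case3 h s t ih =>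
    by_cases hs : pvClean s = []
    · have hcongr := pvJoin_cons_congr ['\n'] (pvFixH h) ih
        (by rw [pvRecA_eq_nil, pvBlocks_eq_nil])
      simpa [pvRecA, pvBlocks, pvBlock, hs] using hcongr
    · have hcs : PySem.Chars.join ['\n'] (pvClean s :: pvRecA t)
          = PySem.Chars.join ['\n'] (pvClean s :: pvBlocks t) :=
        pvJoin_cons_congr ['\n'] (pvClean s) ih (by rw [pvRecA_eq_nil, pvBlocks_eq_nil])
      simp only [pvRecA, pvBlocks, pvBlock, hs, if_true, ne_eq, not_false_eq_true,
        List.cons_append, List.nil_append]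
      cases hb : pvBlocks t with
      | nil =>
        rw [PySem.Chars.join_cons_cons, hcs, hb, PySem.Chars.join_singleton,
          PySem.Chars.join_singleton]
        simp
      | cons b m =>
        rw [PySem.Chars.join_cons_cons, hcs, hb, PySem.Chars.join_cons_cons,
          PySem.Chars.join_cons_cons]
        simp

-- ===== VERDICT (by name: the statement is the Claim_ definition above) =====
theorem fix_fasta_content_spec : Claim_equal_fix_fasta_content := by
  intro content _
  unfold Spec_fix_fasta_content fix_fasta_content fix_fasta_content_alt
  have h1 := pvLoopA_eq (PySem.Chars.splitOn (PySem.Chars.strip content.toList) ['\n']) [] 0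
  simp only [Nat.cast_zero, mul_zero] at h1
  simp only [h1, List.nil_append, List.length_map, pvZip_eq, pvJoin_eq]
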